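-- pv_equiv track=rewrite | github.com/KardelRuveyda/uretken-yapayzeka-chatbot-gelistirme-temelleri | homeworks/marmara/Yusuf Bilal Usta/homework-1.py | sifreyi_coz
-- ===== SOURCE A (Python) =====
-- def sifreyi_coz(sifrelenmis_mesaj):
--     sonuc = ""
--     for karakter in sifrelenmis_mesaj:
--         if karakter.isalpha():
--             ascii_deger = ord(karakter.lower())
--             yeni_ascii = ((ascii_deger - ord('a') - 5) % 26) + ord('a')
--
--             if karakter.isupper():
--                 sonuc += chr(yeni_ascii).upper()
--             else:
--                 sonuc += chr(yeni_ascii)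
--         elif karakter.isdigit():
--             sonuc += karakter
--         else:
--             sonuc += karakter
--     cikti = ""
--     sayi_buffer = ""
--     for karakter in sonuc:
--         if karakter.isdigit():
--             sayi_buffer += karakter
--         else:
--             if sayi_buffer:
--                 cikti += sayi_buffer[::-1]
--                 sayi_buffer = ""
--             cikti += karakter
--
--     if sayi_buffer:
--         cikti += sayi_buffer[::-1]
--     else:
--         cikti += sayi_buffer
--
--     return cikti
-- ===== SOURCE B (Python) =====
-- def _coz(karakter):
--     kucuk = chr((ord(karakter.lower()) - ord('a') - 5) % 26 + ord('a'))
--     return kucuk.upper() if karakter.isupper() else kucuk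
--
--
-- def sifreyi_coz(sifrelenmis_mesaj):
--     # one pass: decode letters on the fly; digit runs are collected already
--     # reversed in ters_sayilar and flushed at every non-digit / at the end
--     cikti = ""
--     ters_sayilar = ""
--     for karakter in sifrelenmis_mesaj:
--         if karakter.isdigit():
--             ters_sayilar = karakter + ters_sayilar
--         else:
--             cikti += ters_sayilar
--             ters_sayilar = ""
--             cikti += _coz(karakter) if karakter.isalpha() else karakter
--     return cikti + ters_sayilar
-- ===== Notes on version B (the rewrite author's own statement) =====
-- stated objective: simpler
-- what changed: A's two sequential passes (Caesar-decode everything into an intermediate string, then scan that string reversing digit runs with a buffer) are fused into one pass that decodes letters on the fly and keeps the current digit run already reversed by prepending, flushing it at every non-digit and at the end.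
import Mathlib
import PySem

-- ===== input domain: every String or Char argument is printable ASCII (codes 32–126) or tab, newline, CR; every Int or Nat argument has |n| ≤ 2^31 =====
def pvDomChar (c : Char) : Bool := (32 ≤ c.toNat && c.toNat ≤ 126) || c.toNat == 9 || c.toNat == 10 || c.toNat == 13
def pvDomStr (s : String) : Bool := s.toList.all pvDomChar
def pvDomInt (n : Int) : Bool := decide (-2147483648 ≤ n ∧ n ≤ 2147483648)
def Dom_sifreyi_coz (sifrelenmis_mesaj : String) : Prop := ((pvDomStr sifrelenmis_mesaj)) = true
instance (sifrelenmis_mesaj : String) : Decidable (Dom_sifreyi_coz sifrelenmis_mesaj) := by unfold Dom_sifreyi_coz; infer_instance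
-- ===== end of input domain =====

-- B fuses A's two passes (Caesar-decode, then reverse digit runs) into one pass
-- that keeps the current digit run already reversed; objective: simpler.

-- ===== PORT A =====
-- first loop: Caesar-decode letters, pass digits and everything else through
def sifreyiCozStage1Step (acc : List Char) (karakter : Char) : List Char :=
  if PySem.Chars.isalpha karakter then
    let ascii_deger : Int := (PySem.Chars.lowerChar karakter).toNat
    let yeni_ascii : Int := PySem.Int.mod (ascii_deger - 97 - 5) 26 + 97
    if PySem.Chars.isupper karakter then
      acc ++ [PySem.Chars.upperChar (Char.ofNat yeni_ascii.toNat)]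
    else
      acc ++ [Char.ofNat yeni_ascii.toNat]
  else if PySem.Chars.isdigit karakter then
    acc ++ [karakter]
  else
    acc ++ [karakter]

-- second loop: (cikti, sayi_buffer); sayi_buffer[::-1] is List.reverse
def sifreyiCozStage2Step (p : List Char × List Char) (karakter : Char) : List Char × List Char :=
  if PySem.Chars.isdigit karakter then
    (p.1, p.2 ++ [karakter])
  else if p.2 ≠ [] then
    (p.1 ++ p.2.reverse ++ [karakter], [])
  else
    (p.1 ++ [karakter], p.2)

def sifreyi_coz (sifrelenmis_mesaj : String) : String :=
  let sonuc := sifrelenmis_mesaj.toList.foldl sifreyiCozStage1Step []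
  let st := sonuc.foldl sifreyiCozStage2Step ([], [])
  if st.2 ≠ [] then String.ofList (st.1 ++ st.2.reverse) else String.ofList (st.1 ++ st.2)

-- ===== PORT B =====
-- helper _coz of Source B
def sifreyiCozChar (karakter : Char) : Char :=
  let kucuk := Char.ofNat (PySem.Int.mod (((PySem.Chars.lowerChar karakter).toNat : Int) - 97 - 5) 26 + 97).toNat
  if PySem.Chars.isupper karakter then PySem.Chars.upperChar kucuk else kucuk

-- single pass: (cikti, ters_sayilar); the digit run is kept already reversed
def sifreyiCozAltStep (p : List Char × List Char) (karakter : Char) : List Char × List Char :=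
  if PySem.Chars.isdigit karakter then
    (p.1, karakter :: p.2)
  else
    (p.1 ++ p.2 ++ [if PySem.Chars.isalpha karakter then sifreyiCozChar karakter else karakter], [])

def sifreyi_coz_alt (sifrelenmis_mesaj : String) : String :=
  let st := sifrelenmis_mesaj.toList.foldl sifreyiCozAltStep ([], [])
  String.ofList (st.1 ++ st.2)

-- ===== PRECONDITION & SPEC =====
def Spec_sifreyi_coz (sifrelenmis_mesaj : String) (out : String) : Prop := out = sifreyi_coz_alt sifrelenmis_mesaj
instance (sifrelenmis_mesaj : String) (out : String) : Decidable (Spec_sifreyi_coz sifrelenmis_mesaj out) := by unfold Spec_sifreyi_coz; infer_instance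

-- ===== CLAIM (what is proved, stated in full; the proofs are below) =====
def Claim_equal_sifreyi_coz : Prop := ∀ (sifrelenmis_mesaj : String), Dom_sifreyi_coz sifrelenmis_mesaj → Spec_sifreyi_coz sifrelenmis_mesaj (sifreyi_coz sifrelenmis_mesaj)

-- ===== LEMMAS AND PROOFS =====

-- the per-character function A's first loop applies
def sifreyiCozG (karakter : Char) : Char :=
  if PySem.Chars.isalpha karakter then sifreyiCozChar karakter else karakter

lemma stage1_step_eq (acc : List Char) (k : Char) :
    sifreyiCozStage1Step acc k = acc ++ [sifreyiCozG k] := by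
  unfold sifreyiCozStage1Step sifreyiCozG sifreyiCozChar
  split_ifs <;> rfl

lemma stage1_eq_map (cs : List Char) :
    cs.foldl sifreyiCozStage1Step [] = cs.map sifreyiCozG := by
  have h : sifreyiCozStage1Step = fun acc k => acc ++ [sifreyiCozG k] :=
    funext fun acc => funext fun k => stage1_step_eq acc k
  rw [h, PySem.List.foldl_append_singleton_eq_map]
  simp

lemma char_le_iff (a b : Char) : a ≤ b ↔ a.toNat ≤ b.toNat := by
  rw [Char.le_def, UInt32.le_iff_toNat_le]; exact Iff.rfl

lemma coz_not_digit (c : Char) : PySem.Chars.isdigit (sifreyiCozChar c) = false := by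
  unfold sifreyiCozChar
  have h0 : (0:Int) ≤ PySem.Int.mod (((PySem.Chars.lowerChar c).toNat : Int) - 97 - 5) 26 :=
    PySem.Int.mod_nonneg _ (by norm_num)
  have h1 : PySem.Int.mod (((PySem.Chars.lowerChar c).toNat : Int) - 97 - 5) 26 < 26 :=
    PySem.Int.mod_lt _ (by norm_num)
  set v : Int := PySem.Int.mod (((PySem.Chars.lowerChar c).toNat : Int) - 97 - 5) 26 with hv
  have hn : (v + 97).toNat = v.toNat + 97 := by omega
  have hval : (Char.ofNat (v + 97).toNat).toNat = v.toNat + 97 := by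
    rw [hn, Char.toNat_ofNat, if_pos]
    unfold Nat.isValidChar
    omega
  have hlt : v.toNat < 26 := by omega
  by_cases hu : PySem.Chars.isupper c = true
  · rw [if_pos hu]
    have hlow : PySem.Chars.islower (Char.ofNat (v + 97).toNat) = true := by
      simp [PySem.Chars.islower, char_le_iff, hval]
      omega
    have hval2 : (PySem.Chars.upperChar (Char.ofNat (v + 97).toNat)).toNat
        = v.toNat + 97 - 32 := by
      rw [PySem.Chars.upperChar, if_pos hlow, hval, Char.toNat_ofNat, if_pos]
      unfold Nat.isValidChar
      omega
    simp [PySem.Chars.isdigit, char_le_iff, hval2]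
  · rw [if_neg hu]
    simp [PySem.Chars.isdigit, char_le_iff, hval]

lemma alpha_not_digit (c : Char) (h : PySem.Chars.isalpha c = true) :
    PySem.Chars.isdigit c = false := by
  simp [PySem.Chars.isalpha, PySem.Chars.isupper, PySem.Chars.islower, char_le_iff] at h
  simp [PySem.Chars.isdigit, char_le_iff]
  intro h1
  rcases h with h | h <;> omega

lemma g_digit (c : Char) : PySem.Chars.isdigit (sifreyiCozG c) = PySem.Chars.isdigit c := by
  unfold sifreyiCozG
  by_cases h : PySem.Chars.isalpha c = true
  · rw [if_pos h, coz_not_digit, alpha_not_digit c h]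
  · rw [if_neg h]

-- main fusion lemma
lemma fuse (cs : List Char) : ∀ (out buf : List Char),
    (let st := (cs.map sifreyiCozG).foldl sifreyiCozStage2Step (out, buf)
     if st.2 ≠ [] then st.1 ++ st.2.reverse else st.1 ++ st.2) =
    (let st := cs.foldl sifreyiCozAltStep (out, buf.reverse)
     st.1 ++ st.2) := by
  induction cs with
  | nil =>
    intro out buf
    simp only [List.map_nil, List.foldl_nil]
    by_cases h : buf = []
    · subst h; simp
    · simp [h]
  | cons c cs ih =>
    intro out buf
    simp only [List.map_cons, List.foldl_cons]
    by_cases hd : PySem.Chars.isdigit c = true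
    · have hgd : PySem.Chars.isdigit (sifreyiCozG c) = true := by rw [g_digit]; exact hd
      rw [show sifreyiCozStage2Step (out, buf) (sifreyiCozG c) = (out, buf ++ [sifreyiCozG c]) by
            simp [sifreyiCozStage2Step, hgd]]
      rw [show sifreyiCozAltStep (out, buf.reverse) c = (out, c :: buf.reverse) by
            simp [sifreyiCozAltStep, hd]]
      have hg : sifreyiCozG c = c := by
        unfold sifreyiCozG
        have : PySem.Chars.isalpha c = false := by
          by_contra h'
          have := alpha_not_digit c (by revert h'; cases PySem.Chars.isalpha c <;> simp)
          rw [this] at hd; exact absurd hd (by simp)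
        rw [this]; simp
      rw [hg, show c :: buf.reverse = (buf ++ [c]).reverse by simp]
      exact ih out (buf ++ [c])
    · have hd' : PySem.Chars.isdigit c = false := by revert hd; cases PySem.Chars.isdigit c <;> simp
      have hgd : PySem.Chars.isdigit (sifreyiCozG c) = false := by rw [g_digit]; exact hd'
      rw [show sifreyiCozAltStep (out, buf.reverse) c =
            (out ++ buf.reverse ++ [sifreyiCozG c], []) by
            simp [sifreyiCozAltStep, hd', sifreyiCozG]]
      by_cases hb : buf = []
      · subst hb
        rw [show sifreyiCozStage2Step (out, ([] : List Char)) (sifreyiCozG c) =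
              (out ++ [sifreyiCozG c], []) by simp [sifreyiCozStage2Step, hgd]]
        have := ih (out ++ [sifreyiCozG c]) []
        simpa using this
      · rw [show sifreyiCozStage2Step (out, buf) (sifreyiCozG c) =
              (out ++ buf.reverse ++ [sifreyiCozG c], []) by
              simp [sifreyiCozStage2Step, hgd, hb]]
        have := ih (out ++ buf.reverse ++ [sifreyiCozG c]) []
        simpa using this

-- ===== VERDICT (by name: the statement is the Claim_ definition above) =====
theorem sifreyi_coz_spec : Claim_equal_sifreyi_coz := by
  intro s _
  unfold Spec_sifreyi_coz sifreyi_coz sifreyi_coz_alt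
  rw [stage1_eq_map]
  have := fuse s.toList [] []
  simp only [List.reverse_nil] at this
  split_ifs at this ⊢ <;> simp_all
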